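-- pv_equiv track=rewrite | github.com/udinilya/algopracticum | 6_алгоритмы_(хэш_функции)/14_периметр.py | solution
-- ===== SOURCE A (Python) =====
-- def solution(n, m, matrix):
--     neighbors = []
--     for x in range(len(matrix)):
--         for y in range(len(matrix[x])):
--             if matrix[x][y] == 1:
--                 if x == 0:
--                     neighbors.append(0)
--                 if y == 0:
--                     neighbors.append(0)
--                 if x == n-1:
--                     neighbors.append(0)
--                 if y == m-1:
--                     neighbors.append(0)
--
--                 if x != 0:
--                     neighbors.append(matrix[x-1][y])
--                 if x != n-1:
--                     neighbors.append(matrix[x + 1][y])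
--                 if y != 0:
--                     neighbors.append(matrix[x][y - 1])
--                 if y != m-1:
--                     neighbors.append(matrix[x][y + 1])
--
--     return neighbors.count(0)
-- ===== SOURCE B (Python) =====
-- def solution(n, m, matrix):
--     # Pass 1: boundary sides of 1-cells (n, m give the declared grid edges).
--     # Pass 2/3: one zero-neighbour credit per adjacent pair, scanned once per edge.
--     total = 0
--     for x, row in enumerate(matrix):
--         for y, v in enumerate(row):
--             if v == 1:
--                 total += (x == 0) + (y == 0) + (x == n - 1) + (y == m - 1)
--     for row in matrix:
--         for a, b in zip(row, row[1:]):
--             total += (a == 1 and b == 0) + (b == 1 and a == 0)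
--     for up, down in zip(matrix, matrix[1:]):
--         for a, b in zip(up, down):
--             total += (a == 1 and b == 0) + (b == 1 and a == 0)
--     return total
-- ===== Notes on version B (the rewrite author's own statement) =====
-- stated objective: alternative
-- what changed: B drops A's per-cell four-neighbour list entirely: it keeps a running integer total, adds the boundary sides of each 1-cell in one pass, and then credits each internal adjacency exactly once by zipping every row with its successor element and every row with the next row, instead of enumerating all four neighbours of every cell and counting zeros in a collected list.
-- outside the precondition, e.g. on solution(1, 1, [[1], [0]]): A returns 4, B returns 5
import Mathlib
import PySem

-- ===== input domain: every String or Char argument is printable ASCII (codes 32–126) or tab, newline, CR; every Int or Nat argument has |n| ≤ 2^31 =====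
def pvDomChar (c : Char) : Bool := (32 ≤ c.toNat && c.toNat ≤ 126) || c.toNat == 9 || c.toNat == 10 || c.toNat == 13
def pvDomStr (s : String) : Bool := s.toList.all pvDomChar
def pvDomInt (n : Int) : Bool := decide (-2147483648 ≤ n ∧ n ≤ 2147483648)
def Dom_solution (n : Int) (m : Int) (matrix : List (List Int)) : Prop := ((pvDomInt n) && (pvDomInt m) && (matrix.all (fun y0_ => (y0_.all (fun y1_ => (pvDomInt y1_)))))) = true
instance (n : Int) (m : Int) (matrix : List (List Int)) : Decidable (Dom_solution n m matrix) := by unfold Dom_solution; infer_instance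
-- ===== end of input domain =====

-- B replaces A's per-cell four-neighbour list with a running total over boundary sides and
-- right/down adjacent pairs (alternative decomposition, same asymptotic cost).

-- ===== PORT A =====
-- Literal port of A. Index accesses use getD; under Pre_solution every access A performs is
-- in range, so the defaults are never consulted on admitted inputs.
def solution (n : Int) (m : Int) (matrix : List (List Int)) : Int :=
  ((List.range matrix.length).foldl (fun acc x =>
      (List.range (matrix.getD x []).length).foldl (fun acc y =>
        let row := matrix.getD x []
        if row.getD y 0 = 1 then
          let acc := if x = 0 then acc ++ [(0 : Int)] else acc
          let acc := if y = 0 then acc ++ [(0 : Int)] else acc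
          let acc := if (x : Int) = n - 1 then acc ++ [(0 : Int)] else acc
          let acc := if (y : Int) = m - 1 then acc ++ [(0 : Int)] else acc
          let acc := if x ≠ 0 then acc ++ [(matrix.getD (x - 1) []).getD y 0] else acc
          let acc := if (x : Int) ≠ n - 1 then acc ++ [(matrix.getD (x + 1) []).getD y 0] else acc
          let acc := if y ≠ 0 then acc ++ [row.getD (y - 1) 0] else acc
          let acc := if (y : Int) ≠ m - 1 then acc ++ [row.getD (y + 1) 0] else acc
          acc
        else acc) acc) ([] : List Int)).count 0

-- ===== PORT B =====
-- Python's bool-to-int coercion in `total += (cond) + (cond)`.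
def pvB (c : Prop) [Decidable c] : Int := if c then 1 else 0

-- row[1:] / matrix[1:] are ported as List.tail (exact for the slice [1:]); zip truncates
-- to the shorter list exactly as Python's zip does.
def solution_alt (n : Int) (m : Int) (matrix : List (List Int)) : Int :=
  let t1 := matrix.zipIdx.foldl (fun total rx =>
      rx.1.zipIdx.foldl (fun total vy =>
        if vy.1 = 1 then
          total + pvB (rx.2 = 0) + pvB (vy.2 = 0)
            + pvB ((rx.2 : Int) = n - 1) + pvB ((vy.2 : Int) = m - 1)
        else total) total) 0
  let t2 := matrix.foldl (fun total row =>
      (row.zip row.tail).foldl (fun total ab =>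
        total + pvB (ab.1 = 1 ∧ ab.2 = 0) + pvB (ab.2 = 1 ∧ ab.1 = 0)) total) t1
  (matrix.zip matrix.tail).foldl (fun total ud =>
      (ud.1.zip ud.2).foldl (fun total ab =>
        total + pvB (ab.1 = 1 ∧ ab.2 = 0) + pvB (ab.2 = 1 ∧ ab.1 = 0)) total) t2

-- ===== PRECONDITION & SPEC =====
-- Pre_ admits grids whose shape matches the declared n×m, and grids containing no 1-cell
-- (A then indexes nothing and returns 0). It excludes mismatched-shape grids that contain a
-- 1-cell: there A's n/m-guarded neighbour indexing usually raises IndexError, and where it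
-- happens to return, the value reflects accidental out-of-shape reads that B does not perform.
def Pre_solution (n : Int) (m : Int) (matrix : List (List Int)) : Prop :=
  ((matrix.length : Int) = n ∧ ∀ row ∈ matrix, (row.length : Int) = m)
  ∨ (∀ row ∈ matrix, ∀ v ∈ row, v ≠ (1 : Int))
instance (n : Int) (m : Int) (matrix : List (List Int)) : Decidable (Pre_solution n m matrix) := by
  unfold Pre_solution; infer_instance
def pvWitness_solution : Int × Int × List (List Int) := (2, 2, [[1, 0], [0, 1]])

def Spec_solution (n : Int) (m : Int) (matrix : List (List Int)) (out : Int) : Prop := out = solution_alt n m matrix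
instance (n : Int) (m : Int) (matrix : List (List Int)) (out : Int) : Decidable (Spec_solution n m matrix out) := by unfold Spec_solution; infer_instance

-- ===== CLAIM (what is proved, stated in full; the proofs are below) =====
def Claim_equal_solution : Prop := ∀ (n : Int) (m : Int) (matrix : List (List Int)), Dom_solution n m matrix → Pre_solution n m matrix → Spec_solution n m matrix (solution n m matrix)

-- ===== LEMMAS AND PROOFS =====

-- cell value with out-of-range default (defaults are never consulted under Pre_solution)
def pvV (matrix : List (List Int)) (x y : Nat) : Int := (matrix.getD x []).getD y 0

-- number of zeros A appends for the cell (x, y)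
def pvSA (n m : Int) (matrix : List (List Int)) (x y : Nat) : Nat :=
  if pvV matrix x y = 1 then
    (if x = 0 then 1 else 0) + (if y = 0 then 1 else 0)
    + (if (x : Int) = n - 1 then 1 else 0) + (if (y : Int) = m - 1 then 1 else 0)
    + (if x ≠ 0 ∧ pvV matrix (x - 1) y = 0 then 1 else 0)
    + (if (x : Int) ≠ n - 1 ∧ pvV matrix (x + 1) y = 0 then 1 else 0)
    + (if y ≠ 0 ∧ pvV matrix x (y - 1) = 0 then 1 else 0)
    + (if (y : Int) ≠ m - 1 ∧ pvV matrix x (y + 1) = 0 then 1 else 0)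
  else 0

lemma pv_cntIf (c : Prop) [Decidable c] (acc : List Int) (v : Int) :
    List.count 0 (if c then acc ++ [v] else acc)
      = List.count 0 acc + (if c ∧ v = 0 then 1 else 0) := by
  by_cases h : c <;> by_cases hv : v = 0 <;> simp [h, hv, List.count_append]

lemma pv_foldl_count (k : Nat) (step : List Int → Nat → List Int) (s : Nat → Nat)
    (h : ∀ acc i, ((step acc i).count 0) = acc.count 0 + s i) (acc0 : List Int) :
    (((List.range k).foldl step acc0).count 0) = acc0.count 0 + ∑ i ∈ Finset.range k, s i := by
  induction k with
  | zero => simp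
  | succ k ih =>
      rw [List.range_succ, List.foldl_append, Finset.sum_range_succ]
      simp only [List.foldl_cons, List.foldl_nil, h, ih]
      omega

lemma pv_foldl_add (k : Nat) (step : Int → Nat → Int) (g : Nat → Int)
    (h : ∀ t i, step t i = t + g i) (c : Int) :
    (List.range k).foldl step c = c + ∑ i ∈ Finset.range k, g i := by
  induction k with
  | zero => simp
  | succ k ih =>
      rw [List.range_succ, List.foldl_append, Finset.sum_range_succ]
      simp only [List.foldl_cons, List.foldl_nil, h, ih]
      ring

lemma pv_zipIdx_foldl {α β : Type} (d : α) (f : β → (α × Nat) → β) :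
    ∀ (l : List α) (off : Nat) (init : β),
      (List.zipIdx l off).foldl f init
        = (List.range l.length).foldl (fun s i => f s (l.getD i d, off + i)) init := by
  intro l
  induction l with
  | nil => intro off init; simp
  | cons a t ih =>
      intro off init
      rw [List.zipIdx_cons, List.foldl_cons, ih, List.length_cons, List.range_succ_eq_map,
          List.foldl_cons, List.foldl_map]
      simp only [List.getD_cons_zero, List.getD_cons_succ, Nat.add_zero]
      congr 1
      funext s i
      have h1 : off + 1 + i = off + (i + 1) := by omega
      rw [h1]

lemma pv_zipIdx_foldl0 {α β : Type} (d : α) (f : β → (α × Nat) → β) (l : List α) (init : β) :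
    (List.zipIdx l).foldl f init
      = (List.range l.length).foldl (fun s i => f s (l.getD i d, i)) init := by
  rw [pv_zipIdx_foldl d f l 0 init]
  simp [Nat.zero_add]

-- A as a double sum of per-cell zero-counts
lemma pv_A_sum (n m : Int) (matrix : List (List Int)) :
    solution n m matrix
      = ((∑ x ∈ Finset.range matrix.length,
            ∑ y ∈ Finset.range (matrix.getD x []).length, pvSA n m matrix x y : Nat) : Int) := by
  unfold solution
  rw [pv_foldl_count _ _
        (fun x => ∑ y ∈ Finset.range (matrix.getD x []).length, pvSA n m matrix x y)
        (fun acc x => by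
          rw [pv_foldl_count _ _ (fun y => pvSA n m matrix x y)
                (fun acc y => by
                  show List.count 0 (if (matrix.getD x []).getD y 0 = 1 then _ else acc)
                        = List.count 0 acc + pvSA n m matrix x y
                  by_cases h : (matrix.getD x []).getD y 0 = 1
                  · rw [if_pos h]
                    simp only [pv_cntIf, eq_self_iff_true, and_true]
                    simp only [pvSA, pvV]
                    rw [if_pos h]
                    ring
                  · rw [if_neg h]
                    simp only [pvSA, pvV]
                    rw [if_neg h]
                    simp) acc]) ([] : List Int)]
  simp

lemma pv_shift_sum (M : Nat) (p : Nat → Int) :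
    (∑ y ∈ Finset.range M, if y = 0 then 0 else p (y - 1))
      = ∑ y ∈ Finset.range M, if y + 1 < M then p y else 0 := by
  cases M with
  | zero => simp
  | succ K =>
      rw [Finset.sum_range_succ' (fun y => if y = 0 then (0 : Int) else p (y - 1)) K]
      rw [Finset.sum_range_succ (fun y => if y + 1 < K + 1 then p y else (0 : Int))]
      have hl : ∀ i ∈ Finset.range K, (if i + 1 = 0 then (0 : Int) else p (i + 1 - 1)) = p i :=
        fun i _ => by simp
      have hr : ∀ i ∈ Finset.range K, (if i + 1 < K + 1 then p i else (0 : Int)) = p i :=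
        fun i hi => if_pos (Nat.succ_lt_succ (Finset.mem_range.mp hi))
      rw [Finset.sum_congr rfl hl, Finset.sum_congr rfl hr]
      simp

-- the one-line rearrangement: per-cell (previous-neighbour, next-neighbour) zero checks
-- equal per-adjacent-pair checks attributed to the earlier cell
lemma pv_line (K : Nat) (a : Nat → Int) :
    (∑ i ∈ Finset.range K,
       (pvB (a i = 1 ∧ i ≠ 0 ∧ a (i - 1) = 0)
        + pvB (a i = 1 ∧ (i : Int) ≠ (K : Int) - 1 ∧ a (i + 1) = 0)))
      = ∑ i ∈ Finset.range K,
          (if (i : Int) + 1 < (K : Int) then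
             pvB (a i = 1 ∧ a (i + 1) = 0) + pvB (a (i + 1) = 1 ∧ a i = 0) else 0) := by
  rw [Finset.sum_add_distrib]
  have h1 : (∑ i ∈ Finset.range K, pvB (a i = 1 ∧ i ≠ 0 ∧ a (i - 1) = 0))
      = ∑ i ∈ Finset.range K,
          (if i = 0 then (0 : Int) else pvB (a ((i - 1) + 1) = 1 ∧ a (i - 1) = 0)) := by
    refine Finset.sum_congr rfl fun i _ => ?_
    rcases Nat.eq_zero_or_pos i with h | h
    · subst h; simp [pvB]
    · rw [if_neg (by omega)]
      have h2 : i - 1 + 1 = i := by omega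
      rw [h2]
      simp [pvB, show i ≠ 0 by omega, and_comm]
  rw [h1, pv_shift_sum K (fun t => pvB (a (t + 1) = 1 ∧ a t = 0))]
  have h3 : (∑ i ∈ Finset.range K, pvB (a i = 1 ∧ (i : Int) ≠ (K : Int) - 1 ∧ a (i + 1) = 0))
      = ∑ i ∈ Finset.range K, (if i + 1 < K then pvB (a i = 1 ∧ a (i + 1) = 0) else 0) := by
    refine Finset.sum_congr rfl fun i hi => ?_
    have hiK := Finset.mem_range.mp hi
    by_cases hc : i + 1 < K
    · rw [if_pos hc]
      simp [pvB, show (i : Int) ≠ (K : Int) - 1 by omega]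
    · rw [if_neg hc]
      simp [pvB, show (i : Int) = (K : Int) - 1 by omega]
  rw [h3, ← Finset.sum_add_distrib]
  refine Finset.sum_congr rfl fun i _ => ?_
  have hcast : ((i : Int) + 1 < (K : Int)) ↔ (i + 1 < K) := by omega
  by_cases hc : i + 1 < K <;> simp [hc, hcast] <;> ring

-- the five ingredients of A's per-cell count, and B's two pair terms
def pvB0 (n m : Int) (matrix : List (List Int)) (x y : Nat) : Int :=
  if pvV matrix x y = 1 then
    pvB (x = 0) + pvB (y = 0) + pvB ((x : Int) = n - 1) + pvB ((y : Int) = m - 1) else 0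
def pvU (matrix : List (List Int)) (x y : Nat) : Int :=
  pvB (pvV matrix x y = 1 ∧ x ≠ 0 ∧ pvV matrix (x - 1) y = 0)
def pvD (n : Int) (matrix : List (List Int)) (x y : Nat) : Int :=
  pvB (pvV matrix x y = 1 ∧ (x : Int) ≠ n - 1 ∧ pvV matrix (x + 1) y = 0)
def pvL (matrix : List (List Int)) (x y : Nat) : Int :=
  pvB (pvV matrix x y = 1 ∧ y ≠ 0 ∧ pvV matrix x (y - 1) = 0)
def pvR (m : Int) (matrix : List (List Int)) (x y : Nat) : Int :=
  pvB (pvV matrix x y = 1 ∧ (y : Int) ≠ m - 1 ∧ pvV matrix x (y + 1) = 0)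
lemma pv_SA_split (n m : Int) (matrix : List (List Int)) (x y : Nat) :
    ((pvSA n m matrix x y : Nat) : Int)
      = pvB0 n m matrix x y + pvU matrix x y + pvD n matrix x y
        + pvL matrix x y + pvR m matrix x y := by
  unfold pvSA pvB0 pvU pvD pvL pvR pvB
  by_cases h : pvV matrix x y = 1
  · simp only [h, if_true, true_and]
    push_cast
    ring
  · simp [h]

-- B's per-pair credit
def pvGP (ab : Int × Int) : Int :=
  pvB (ab.1 = 1 ∧ ab.2 = 0) + pvB (ab.2 = 1 ∧ ab.1 = 0)
def pvPH (matrix : List (List Int)) (x y : Nat) : Int :=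
  pvB (pvV matrix x y = 1 ∧ pvV matrix x (y + 1) = 0)
  + pvB (pvV matrix x (y + 1) = 1 ∧ pvV matrix x y = 0)
def pvPV (matrix : List (List Int)) (x y : Nat) : Int :=
  pvB (pvV matrix x y = 1 ∧ pvV matrix (x + 1) y = 0)
  + pvB (pvV matrix (x + 1) y = 1 ∧ pvV matrix x y = 0)

lemma pv_foldl_add_list {α : Type} (step : Int → α → Int) (g : α → Int)
    (h : ∀ t a, step t a = t + g a) :
    ∀ (l : List α) (c : Int), l.foldl step c = c + (l.map g).sum := by
  intro l
  induction l with
  | nil => intro c; simp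
  | cons a t ih =>
      intro c
      rw [List.foldl_cons, ih, h, List.map_cons, List.sum_cons]
      ring

lemma pv_map_sum {α : Type} (d : α) (g : α → Int) :
    ∀ l : List α, (l.map g).sum = ∑ i ∈ Finset.range l.length, g (l.getD i d) := by
  intro l
  induction l with
  | nil => simp
  | cons a t ih =>
      rw [List.map_cons, List.sum_cons, ih, List.length_cons,
          Finset.sum_range_succ' (fun i => g ((a :: t).getD i d)) t.length]
      simp
      ring

lemma pv_sum_map_range (K : Nat) (f : Nat → Int) :
    ((List.range K).map f).sum = ∑ i ∈ Finset.range K, f i := by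
  induction K with
  | zero => simp
  | succ K ih => rw [List.range_succ, Finset.sum_range_succ, List.map_append, List.sum_append, ih]; simp

lemma pv_zip_getD {α β : Type} (da : α) (db : β) :
    ∀ (l1 : List α) (l2 : List β),
      l1.zip l2 = (List.range (min l1.length l2.length)).map
        (fun i => (l1.getD i da, l2.getD i db)) := by
  intro l1
  induction l1 with
  | nil => intro l2; simp
  | cons a t ih =>
      intro l2
      cases l2 with
      | nil => simp
      | cons b s =>
          rw [List.zip_cons_cons, ih s, List.length_cons, List.length_cons,
              Nat.succ_min_succ, List.range_succ_eq_map, List.map_cons, List.map_map]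
          simp [Function.comp]

lemma pv_tail_getD (l : List Int) (i : Nat) : l.tail.getD i 0 = l.getD (i + 1) 0 := by
  cases l <;> simp
lemma pv_tail_getD2 (l : List (List Int)) (i : Nat) : l.tail.getD i [] = l.getD (i + 1) [] := by
  cases l <;> simp

-- per-row horizontal pair sum
lemma pv_row_pairs (row : List Int) :
    (((row.zip row.tail).map pvGP).sum)
      = ∑ y ∈ Finset.range (row.length - 1), pvGP (row.getD y 0, row.getD (y + 1) 0) := by
  rw [pv_zip_getD (0 : Int) (0 : Int), List.map_map, pv_sum_map_range]
  have hmin : min row.length row.tail.length = row.length - 1 := by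
    rw [List.length_tail]; omega
  rw [hmin]
  exact Finset.sum_congr rfl fun y _ => by simp [Function.comp, pv_tail_getD]

-- B as three clean double sums
lemma pv_B_sum (n m : Int) (matrix : List (List Int)) :
    solution_alt n m matrix
      = (∑ x ∈ Finset.range matrix.length,
           ∑ y ∈ Finset.range (matrix.getD x []).length, pvB0 n m matrix x y)
        + (∑ x ∈ Finset.range matrix.length,
             ∑ y ∈ Finset.range ((matrix.getD x []).length - 1), pvPH matrix x y)
        + (∑ x ∈ Finset.range (matrix.length - 1),
             ∑ y ∈ Finset.range (min (matrix.getD x []).length (matrix.getD (x + 1) []).length),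
               pvPV matrix x y) := by
  unfold solution_alt
  rw [pv_zipIdx_foldl0 ([] : List Int)]
  rw [pv_foldl_add _ _
        (fun x => ∑ y ∈ Finset.range (matrix.getD x []).length, pvB0 n m matrix x y)
        (fun t x => by
          dsimp only
          rw [pv_zipIdx_foldl0 (0 : Int)]
          rw [pv_foldl_add _ _ (fun y => pvB0 n m matrix x y)
                (fun t y => by
                  dsimp only
                  simp only [pvB0, pvV]
                  split_ifs <;> ring) t]) 0]
  have hpair : ∀ (t : Int) (ab : Int × Int),
      t + pvB (ab.1 = 1 ∧ ab.2 = 0) + pvB (ab.2 = 1 ∧ ab.1 = 0) = t + pvGP ab :=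
    fun t ab => by simp only [pvGP]; ring
  rw [pv_foldl_add_list
        (fun total ud => (ud.1.zip ud.2).foldl (fun total ab =>
          total + pvB (ab.1 = 1 ∧ ab.2 = 0) + pvB (ab.2 = 1 ∧ ab.1 = 0)) total)
        (fun ud => ((ud.1.zip ud.2).map pvGP).sum)
        (fun t ud => pv_foldl_add_list
          (fun total ab => total + pvB (ab.1 = 1 ∧ ab.2 = 0) + pvB (ab.2 = 1 ∧ ab.1 = 0))
          pvGP hpair (ud.1.zip ud.2) t)
        (matrix.zip matrix.tail)]
  rw [pv_foldl_add_list
        (fun total row => (row.zip row.tail).foldl (fun total ab =>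
          total + pvB (ab.1 = 1 ∧ ab.2 = 0) + pvB (ab.2 = 1 ∧ ab.1 = 0)) total)
        (fun row => ((row.zip row.tail).map pvGP).sum)
        (fun t row => pv_foldl_add_list
          (fun total ab => total + pvB (ab.1 = 1 ∧ ab.2 = 0) + pvB (ab.2 = 1 ∧ ab.1 = 0))
          pvGP hpair (row.zip row.tail) t)
        matrix]
  rw [pv_map_sum ([] : List Int) (fun row => ((row.zip row.tail).map pvGP).sum) matrix]
  rw [pv_map_sum (([] : List Int), ([] : List Int))
        (fun ud => ((ud.1.zip ud.2).map pvGP).sum) (matrix.zip matrix.tail)]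
  have h2 : (∑ x ∈ Finset.range matrix.length,
        ((((matrix.getD x []).zip (matrix.getD x []).tail).map pvGP).sum))
      = ∑ x ∈ Finset.range matrix.length,
          ∑ y ∈ Finset.range ((matrix.getD x []).length - 1), pvPH matrix x y := by
    refine Finset.sum_congr rfl fun x _ => ?_
    rw [pv_row_pairs]
    exact Finset.sum_congr rfl fun y _ => by simp [pvGP, pvPH, pvV]
  have hlen : (matrix.zip matrix.tail).length = matrix.length - 1 := by
    rw [List.length_zip, List.length_tail]; omega
  have h3 : (∑ x ∈ Finset.range (matrix.zip matrix.tail).length,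
        (((((matrix.zip matrix.tail).getD x ([], [])).1.zip
            ((matrix.zip matrix.tail).getD x ([], [])).2).map pvGP).sum))
      = ∑ x ∈ Finset.range (matrix.length - 1),
          ∑ y ∈ Finset.range (min (matrix.getD x []).length (matrix.getD (x + 1) []).length),
            pvPV matrix x y := by
    rw [hlen]
    refine Finset.sum_congr rfl fun x hx => ?_
    have hx' : x < matrix.length - 1 := Finset.mem_range.mp hx
    have hud : (matrix.zip matrix.tail).getD x ([], [])
        = (matrix.getD x [], matrix.getD (x + 1) []) := by
      rw [pv_zip_getD ([] : List Int) ([] : List Int)]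
      rw [List.getD_eq_getElem]
      · simp [pv_tail_getD2]
      · simp [List.length_tail]; omega
    rw [hud]
    rw [pv_zip_getD (0 : Int) (0 : Int), List.map_map, pv_sum_map_range]
    exact Finset.sum_congr rfl fun y _ => by simp [pvGP, pvPV, pvV, Function.comp]
  rw [h2, h3]
  ring

lemma pv_guard_range (K : Nat) (f : Nat → Int) :
    (∑ i ∈ Finset.range K, if (i : Int) + 1 < (K : Int) then f i else 0)
      = ∑ i ∈ Finset.range (K - 1), f i := by
  cases K with
  | zero => simp
  | succ J =>
      rw [Finset.sum_range_succ, if_neg (by omega), add_zero, Nat.succ_sub_one]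
      exact Finset.sum_congr rfl fun i hi => by
        rw [if_pos (by have := Finset.mem_range.mp hi; omega)]

-- per-line rearrangement in pair form
lemma pv_line' (K : Nat) (a : Nat → Int) :
    (∑ i ∈ Finset.range K,
       (pvB (a i = 1 ∧ i ≠ 0 ∧ a (i - 1) = 0)
        + pvB (a i = 1 ∧ (i : Int) ≠ (K : Int) - 1 ∧ a (i + 1) = 0)))
      = ∑ i ∈ Finset.range (K - 1),
          (pvB (a i = 1 ∧ a (i + 1) = 0) + pvB (a (i + 1) = 1 ∧ a i = 0)) := by
  rw [pv_line]
  exact pv_guard_range K _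

-- the rectangle rearrangement; holds for any bounds X M (pvV is total)
lemma pv_core (matrix : List (List Int)) (X M : Nat) :
    (∑ x ∈ Finset.range X, ∑ y ∈ Finset.range M,
        ((pvSA (X : Int) (M : Int) matrix x y : Nat) : Int))
      = (∑ x ∈ Finset.range X, ∑ y ∈ Finset.range M, pvB0 (X : Int) (M : Int) matrix x y)
        + (∑ x ∈ Finset.range X, ∑ y ∈ Finset.range (M - 1), pvPH matrix x y)
        + (∑ x ∈ Finset.range (X - 1), ∑ y ∈ Finset.range M, pvPV matrix x y) := by
  simp only [pv_SA_split, Finset.sum_add_distrib]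
  have hH : (∑ x ∈ Finset.range X, ∑ y ∈ Finset.range M, pvL matrix x y)
      + (∑ x ∈ Finset.range X, ∑ y ∈ Finset.range M, pvR (M : Int) matrix x y)
      = ∑ x ∈ Finset.range X, ∑ y ∈ Finset.range (M - 1), pvPH matrix x y := by
    rw [← Finset.sum_add_distrib]
    refine Finset.sum_congr rfl fun x _ => ?_
    rw [← Finset.sum_add_distrib]
    simpa [pvL, pvR, pvPH] using pv_line' M (fun y => pvV matrix x y)
  have hV : (∑ x ∈ Finset.range X, ∑ y ∈ Finset.range M, pvU matrix x y)
      + (∑ x ∈ Finset.range X, ∑ y ∈ Finset.range M, pvD (X : Int) matrix x y)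
      = ∑ x ∈ Finset.range (X - 1), ∑ y ∈ Finset.range M, pvPV matrix x y := by
    have e1 : (∑ x ∈ Finset.range X, ∑ y ∈ Finset.range M, pvU matrix x y)
        + (∑ x ∈ Finset.range X, ∑ y ∈ Finset.range M, pvD (X : Int) matrix x y)
        = ∑ x ∈ Finset.range X, ∑ y ∈ Finset.range M,
            (pvU matrix x y + pvD (X : Int) matrix x y) := by
      rw [← Finset.sum_add_distrib]
      exact Finset.sum_congr rfl fun x _ => (Finset.sum_add_distrib).symm
    rw [e1, Finset.sum_comm]
    rw [Finset.sum_congr rfl (fun y (_ : y ∈ Finset.range M) => by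
          simpa [pvU, pvD, pvPV] using pv_line' X (fun x => pvV matrix x y))]
    exact Finset.sum_comm
  linarith

-- ===== VERDICT (by name: the statement is the Claim_ definition above) =====
theorem solution_spec : Claim_equal_solution := by
  intro n m matrix _ hpre
  unfold Spec_solution
  rcases hpre with ⟨hX, hrow⟩ | hno
  · -- declared shape matches the matrix
    cases matrix with
    | nil =>
        simp [solution, solution_alt]
    | cons r t =>
        have hm : m = ((r.length : Nat) : Int) := (hrow r List.mem_cons_self).symm
        have hn : n = (((r :: t).length : Nat) : Int) := hX.symm
        subst hm hn
        rw [pv_A_sum, pv_B_sum]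
        have hW : ∀ x, x < (r :: t).length → ((r :: t).getD x []).length = r.length := by
          intro x hx
          have hmem : (r :: t).getD x [] ∈ (r :: t) := by
            rw [List.getD_eq_getElem _ _ hx]
            exact List.getElem_mem _
          have h := hrow _ hmem
          omega
        simp only [Nat.cast_sum]
        rw [Finset.sum_congr rfl (fun x hx =>
              (by rw [hW x (Finset.mem_range.mp hx)] :
                (∑ y ∈ Finset.range ((r :: t).getD x []).length,
                    ((pvSA (((r :: t).length : Nat) : Int) ((r.length : Nat) : Int) (r :: t) x y : Nat) : Int))
                  = ∑ y ∈ Finset.range r.length,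
                      ((pvSA (((r :: t).length : Nat) : Int) ((r.length : Nat) : Int) (r :: t) x y : Nat) : Int)))]
        rw [Finset.sum_congr rfl (fun x hx =>
              (by rw [hW x (Finset.mem_range.mp hx)] :
                (∑ y ∈ Finset.range ((r :: t).getD x []).length,
                    pvB0 (((r :: t).length : Nat) : Int) ((r.length : Nat) : Int) (r :: t) x y)
                  = ∑ y ∈ Finset.range r.length,
                      pvB0 (((r :: t).length : Nat) : Int) ((r.length : Nat) : Int) (r :: t) x y))]
        rw [Finset.sum_congr rfl (fun x hx =>
              (by rw [hW x (Finset.mem_range.mp hx)] :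
                (∑ y ∈ Finset.range (((r :: t).getD x []).length - 1), pvPH (r :: t) x y)
                  = ∑ y ∈ Finset.range (r.length - 1), pvPH (r :: t) x y))]
        rw [Finset.sum_congr rfl (fun x hx =>
              (by rw [hW x (by have := Finset.mem_range.mp hx; omega),
                      hW (x + 1) (by have := Finset.mem_range.mp hx; omega), Nat.min_self] :
                (∑ y ∈ Finset.range
                      (min ((r :: t).getD x []).length ((r :: t).getD (x + 1) []).length),
                    pvPV (r :: t) x y)
                  = ∑ y ∈ Finset.range r.length, pvPV (r :: t) x y))]
        exact pv_core (r :: t) (r :: t).length r.length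
  · -- no cell equals 1: A touches nothing and returns 0, and so does B
    have hv1 : ∀ x y, x < matrix.length → y < (matrix.getD x []).length →
        pvV matrix x y ≠ 1 := by
      intro x y hx hy
      have hrm : matrix.getD x [] ∈ matrix := by
        rw [List.getD_eq_getElem _ _ hx]
        exact List.getElem_mem _
      have hvm : pvV matrix x y ∈ matrix.getD x [] := by
        rw [pvV, List.getD_eq_getElem _ _ hy]
        exact List.getElem_mem _
      exact hno _ hrm _ hvm
    rw [pv_A_sum, pv_B_sum]
    rw [Finset.sum_eq_zero (fun x hx => Finset.sum_eq_zero (fun y hy => by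
          simp [pvSA, hv1 x y (Finset.mem_range.mp hx) (Finset.mem_range.mp hy)]))]
    rw [Finset.sum_eq_zero (fun x hx => Finset.sum_eq_zero (fun y hy => by
          simp [pvB0, hv1 x y (Finset.mem_range.mp hx) (Finset.mem_range.mp hy)]))]
    rw [Finset.sum_eq_zero (fun x hx => Finset.sum_eq_zero (fun y hy => by
          have hx' := Finset.mem_range.mp hx
          have hy' := Finset.mem_range.mp hy
          simp [pvPH, pvB, hv1 x y hx' (by omega), hv1 x (y + 1) hx' (by omega)]))]
    rw [Finset.sum_eq_zero (fun x hx => Finset.sum_eq_zero (fun y hy => by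
          have hx' := Finset.mem_range.mp hx
          have hy' := Finset.mem_range.mp hy
          simp [pvPV, pvB, hv1 x y (by omega) (by omega),
                hv1 (x + 1) y (by omega) (by omega)]))]
    simp
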